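-- pv_equiv track=rewrite | github.com/EricBouwers/adventofcode | 2024/08/solve.py | part2
-- ===== SOURCE A (Python) =====
-- import itertools
-- from collections import defaultdict
--
-- def parse_data(data):
--     antennas = defaultdict(lambda: list())
--     for y, line in enumerate(data):
--         for x, c in enumerate(line):
--             if c != '.':
--                 antennas[c].append((x, y))
--
--     return antennas, len(data[0]), len(data)
--
-- def part2(data):
--     antennas, max_x, max_y = parse_data(data)
--
--     antinodes = set()
--     for antenna in antennas.keys():
--         for a1, a2 in itertools.combinations(antennas[antenna], 2):
--             x_diff = a1[0] - a2[0]
--             y_diff = a1[1] - a2[1]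
--
--             new_pos = (a1[0] + x_diff, a1[1] + y_diff)
--             in_bounds = 0 <= new_pos[0] < max_x and 0 <= new_pos[1] < max_y
--             while in_bounds:
--                 antinodes.add(new_pos)
--                 new_pos = (new_pos[0] + x_diff, new_pos[1] + y_diff)
--                 in_bounds = 0 <= new_pos[0] < max_x and 0 <= new_pos[1] < max_y
--
--             new_pos = (a2[0] - x_diff, a2[1] - y_diff)
--             in_bounds = 0 <= new_pos[0] < max_x and 0 <= new_pos[1] < max_y
--             while in_bounds:
--                 antinodes.add(new_pos)
--                 new_pos = (new_pos[0] - x_diff, new_pos[1] - y_diff)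
--                 in_bounds = 0 <= new_pos[0] < max_x and 0 <= new_pos[1] < max_y
--
--     for v in [x for x in antennas.values() if len(x) > 1]:
--         antinodes.update(set(v))
--
--     return len(antinodes)
-- ===== SOURCE B (Python) =====
-- def part2(data):
--     max_x, max_y = len(data[0]), len(data)
--     ants = [(c, x, y)
--             for y, line in enumerate(data)
--             for x, c in enumerate(line) if c != '.']
--     antinodes = set()
--     for c1, x1, y1 in ants:
--         for c2, x2, y2 in ants:
--             if c1 == c2 and (x1, y1) != (x2, y2):
--                 dx, dy = x1 - x2, y1 - y2
--                 antinodes.add((x1, y1))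
--                 px, py = x1 + dx, y1 + dy
--                 while 0 <= px < max_x and 0 <= py < max_y:
--                     antinodes.add((px, py))
--                     px, py = px + dx, py + dy
--     return len(antinodes)
-- ===== Notes on version B (the rewrite author's own statement) =====
-- stated objective: simpler
-- what changed: B drops the defaultdict grouping, itertools.combinations, the second (mirror) while loop and the final antenna re-adding pass: it scans all ordered pairs of a flat antenna list and, per pair, adds the first antenna and walks one outward ray, the opposite ray being covered by the reversed pair.
-- outside the precondition, e.g. on part2([]): A raises IndexError, B raises IndexError
import Mathlib
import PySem

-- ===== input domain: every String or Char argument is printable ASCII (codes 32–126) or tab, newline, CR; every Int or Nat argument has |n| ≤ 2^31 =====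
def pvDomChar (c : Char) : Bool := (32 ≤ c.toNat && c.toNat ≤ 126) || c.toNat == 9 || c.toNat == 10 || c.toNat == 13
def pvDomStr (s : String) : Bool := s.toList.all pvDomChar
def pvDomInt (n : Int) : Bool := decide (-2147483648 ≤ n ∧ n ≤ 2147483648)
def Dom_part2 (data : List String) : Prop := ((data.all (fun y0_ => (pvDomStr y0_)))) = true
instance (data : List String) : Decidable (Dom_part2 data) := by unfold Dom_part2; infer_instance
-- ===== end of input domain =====

-- B keeps A's ray-walking set semantics but replaces the defaultdict grouping + itertools.combinations
-- + two mirror while-loops + final antenna re-adding pass by one ordered-pair scan of a flat antenna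
-- list with a single outward walk per ordered pair (objective: simpler).

-- ===== PORT A =====

-- '0 <= px < max_x and 0 <= py < max_y'
def inBounds (mx my x y : Int) : Bool :=
  decide (0 ≤ x) && decide (x < mx) && decide (0 ≤ y) && decide (y < my)

-- the 'while in_bounds: antinodes.add(new_pos); new_pos += (dx, dy)' loop of both Pythons.
-- fuel is only a termination guard: the Python loop runs at most mx+my+1 times (its step is never (0,0))
def walkLoop (mx my dx dy : Int) : Nat → Int × Int → PySem.Set (Int × Int) → PySem.Set (Int × Int)
  | 0, _, s => s
  | f + 1, p, s =>
      if inBounds mx my p.1 p.2 then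
        walkLoop mx my dx dy f (p.1 + dx, p.2 + dy) (PySem.Set.add s p)
      else s

def walkFuel (mx my : Int) : Nat := mx.toNat + my.toNat + 1

-- itertools.combinations(l, 2), in itertools order
def combos {α : Type} : List α → List (α × α)
  | [] => []
  | x :: xs => xs.map (fun y => (x, y)) ++ combos xs

-- parse_data; defaultdict(list) + append is Dict.modify with default [].
-- len(data[0]) raises IndexError on data = [] (excluded by Pre_); the port reads a default "" there.
def parseData (data : List String) : PySem.Dict Char (List (Int × Int)) × Int × Int :=
  let antennas := (PySem.List.enumerate data 0).foldl
    (fun d yl => (PySem.List.enumerate yl.2.toList 0).foldl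
      (fun d xc => if xc.2 != '.' then d.modify xc.2 [] (fun v => v ++ [(xc.1, yl.1)]) else d) d)
    PySem.Dict.empty
  (antennas, (((PySem.List.pyGet? data 0).getD "").toList.length : Int), (data.length : Int))

def part2 (data : List String) : Int :=
  let P := parseData data
  let antennas := P.1
  let max_x := P.2.1
  let max_y := P.2.2
  let antinodes : PySem.Set (Int × Int) := antennas.keys.foldl (fun s c =>
    (combos (antennas.getD c [])).foldl (fun s pr =>
      let xd := pr.1.1 - pr.2.1
      let yd := pr.1.2 - pr.2.2
      let s := walkLoop max_x max_y xd yd (walkFuel max_x max_y) (pr.1.1 + xd, pr.1.2 + yd) s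
      walkLoop max_x max_y (-xd) (-yd) (walkFuel max_x max_y) (pr.2.1 - xd, pr.2.2 - yd) s) s)
    PySem.Set.empty
  let antinodes := (antennas.values.filter (fun v => decide (1 < v.length))).foldl
    (fun s v => PySem.Set.update s (PySem.Set.ofList v)) antinodes
  PySem.Set.len antinodes

-- ===== PORT B =====

-- the flat antenna comprehension [(c, x, y) for y, line in enumerate(data) for x, c in enumerate(line) if c != '.']
def altAnts (data : List String) : List (Char × Int × Int) :=
  (PySem.List.enumerate data 0).flatMap (fun yl =>
    ((PySem.List.enumerate yl.2.toList 0).filter (fun xc => xc.2 != '.')).map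
      (fun xc => (xc.2, xc.1, yl.1)))

def part2_alt (data : List String) : Int :=
  let max_x : Int := (((PySem.List.pyGet? data 0).getD "").toList.length : Int)
  let max_y : Int := (data.length : Int)
  let ants := altAnts data
  let antinodes : PySem.Set (Int × Int) := ants.foldl (fun s a => ants.foldl (fun s b =>
      if a.1 == b.1 && a.2 != b.2 then
        let dx := a.2.1 - b.2.1
        let dy := a.2.2 - b.2.2
        walkLoop max_x max_y dx dy (walkFuel max_x max_y) (a.2.1 + dx, a.2.2 + dy)
          (PySem.Set.add s a.2)
      else s) s) PySem.Set.empty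
  PySem.Set.len antinodes

-- ===== PRECONDITION & SPEC =====
-- Pre_ excludes only data = [], where the Python A raises IndexError on data[0].
def Pre_part2 (data : List String) : Prop := data ≠ []
instance (data : List String) : Decidable (Pre_part2 data) := by unfold Pre_part2; infer_instance

def pvWitness_part2 : List String := ["aa..", "....", ".a.b", "...b"]

def Spec_part2 (data : List String) (out : Int) : Prop := out = part2_alt data
instance (data : List String) (out : Int) : Decidable (Spec_part2 data out) := by unfold Spec_part2; infer_instance

-- ===== CLAIM (what is proved, stated in full; the proofs are below) =====
def Claim_equal_part2 : Prop := ∀ (data : List String), Dom_part2 data → Pre_part2 data → Spec_part2 data (part2 data)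

-- ===== LEMMAS AND PROOFS =====

-- the membership predicate of the while loop: x is one of the visited cells
def RunMem (mx my dx dy : Int) : Nat → Int × Int → Int × Int → Prop
  | 0, _, _ => False
  | f + 1, p, x =>
      inBounds mx my p.1 p.2 = true ∧ (x = p ∨ RunMem mx my dx dy f (p.1 + dx, p.2 + dy) x)

-- abbreviations for the shared quantities
def gMX (data : List String) : Int := (((PySem.List.pyGet? data 0).getD "").toList.length : Int)
def gMY (data : List String) : Int := (data.length : Int)
def gD (data : List String) : PySem.Dict Char (List (Int × Int)) := (parseData data).1
def gF (data : List String) : Nat := walkFuel (gMX data) (gMY data)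

-- the body of A's per-pair loop (two mirror walks) and of B's inner loop
def pairStep (mx my : Int) (F : Nat) (s : PySem.Set (Int × Int))
    (pr : (Int × Int) × (Int × Int)) : PySem.Set (Int × Int) :=
  walkLoop mx my (-(pr.1.1 - pr.2.1)) (-(pr.1.2 - pr.2.2)) F
    (pr.2.1 - (pr.1.1 - pr.2.1), pr.2.2 - (pr.1.2 - pr.2.2))
    (walkLoop mx my (pr.1.1 - pr.2.1) (pr.1.2 - pr.2.2) F
      (pr.1.1 + (pr.1.1 - pr.2.1), pr.1.2 + (pr.1.2 - pr.2.2)) s)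

def bStep (mx my : Int) (F : Nat) (a : Char × Int × Int) (s : PySem.Set (Int × Int))
    (b : Char × Int × Int) : PySem.Set (Int × Int) :=
  if a.1 == b.1 && a.2 != b.2 then
    walkLoop mx my (a.2.1 - b.2.1) (a.2.2 - b.2.2) F
      (a.2.1 + (a.2.1 - b.2.1), a.2.2 + (a.2.2 - b.2.2)) (PySem.Set.add s a.2)
  else s

-- the two antinode sets, before taking len
def Aset (data : List String) : PySem.Set (Int × Int) :=
  ((gD data).values.filter (fun v => decide (1 < v.length))).foldl
    (fun s v => PySem.Set.update s (PySem.Set.ofList v))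
    ((gD data).keys.foldl (fun s c =>
      (combos ((gD data).getD c [])).foldl (pairStep (gMX data) (gMY data) (gF data)) s)
      PySem.Set.empty)

def Bset (data : List String) : PySem.Set (Int × Int) :=
  (altAnts data).foldl (fun s a =>
      (altAnts data).foldl (bStep (gMX data) (gMY data) (gF data) a) s)
    PySem.Set.empty

lemma part2_eq_len (data : List String) : part2 data = PySem.Set.len (Aset data) := rfl

lemma part2_alt_eq_len (data : List String) : part2_alt data = PySem.Set.len (Bset data) := rfl

-- x lies on the ray out of p away from q (antennas p, q; endpoint p excluded)
def RunP (data : List String) (p q x : Int × Int) : Prop :=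
  RunMem (gMX data) (gMY data) (p.1 - q.1) (p.2 - q.2) (gF data)
    (p.1 + (p.1 - q.1), p.2 + (p.2 - q.2)) x

-- generic membership / nodup transport through a foldl whose step only adds elements
lemma mem_foldl_of_step {α β : Type} (f : List β → α → List β) (C : α → β → Prop)
    (h : ∀ s a x, x ∈ f s a ↔ x ∈ s ∨ C a x) :
    ∀ (l : List α) (s : List β) (x : β), x ∈ l.foldl f s ↔ x ∈ s ∨ ∃ a ∈ l, C a x := by
  intro l
  induction l with
  | nil => simp
  | cons a l ih =>
      intro s x
      simp only [List.foldl_cons, ih, h, List.mem_cons]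
      constructor
      · rintro ((hs | hc) | ⟨b, hb, hcb⟩)
        · exact Or.inl hs
        · exact Or.inr ⟨a, Or.inl rfl, hc⟩
        · exact Or.inr ⟨b, Or.inr hb, hcb⟩
      · rintro (hs | ⟨b, (rfl | hb), hcb⟩)
        · exact Or.inl (Or.inl hs)
        · exact Or.inl (Or.inr hcb)
        · exact Or.inr ⟨b, hb, hcb⟩

lemma nodup_foldl_of_step {α β : Type} (f : List β → α → List β)
    (h : ∀ s a, s.Nodup → (f s a).Nodup) :
    ∀ (l : List α) (s : List β), s.Nodup → (l.foldl f s).Nodup := by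
  intro l
  induction l with
  | nil => exact fun s hs => hs
  | cons a l ih => intro s hs; exact ih _ (h s a hs)

lemma mem_walkLoop (mx my dx dy : Int) (f : Nat) (p : Int × Int) (s : PySem.Set (Int × Int))
    (x : Int × Int) : x ∈ walkLoop mx my dx dy f p s ↔ x ∈ s ∨ RunMem mx my dx dy f p x := by
  induction f generalizing p s with
  | zero => simp [walkLoop, RunMem]
  | succ f ih =>
      simp only [walkLoop, RunMem]
      split_ifs with h
      · rw [ih]
        simp [PySem.Set.mem_add, h]
        tauto
      · simp [h]

lemma nodup_walkLoop (mx my dx dy : Int) (f : Nat) (p : Int × Int) (s : PySem.Set (Int × Int))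
    (h : s.Nodup) : (walkLoop mx my dx dy f p s).Nodup := by
  induction f generalizing p s with
  | zero => simpa [walkLoop]
  | succ f ih =>
      simp only [walkLoop]
      split_ifs with hb
      · exact ih _ _ (PySem.Set.nodup_add s p h)
      · exact h

lemma mem_combos_sub {α : Type} (l : List α) (p : α × α) (h : p ∈ combos l) :
    p.1 ∈ l ∧ p.2 ∈ l := by
  induction l with
  | nil => simp [combos] at h
  | cons a l ih =>
      simp only [combos, List.mem_append, List.mem_map] at h
      rcases h with ⟨b, hb, rfl⟩ | h
      · simp [hb]
      · rcases ih h with ⟨h1, h2⟩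
        exact ⟨List.mem_cons_of_mem _ h1, List.mem_cons_of_mem _ h2⟩

lemma mem_combos_total {α : Type} (l : List α) (a b : α) (ha : a ∈ l) (hb : b ∈ l) (hne : a ≠ b) :
    (a, b) ∈ combos l ∨ (b, a) ∈ combos l := by
  induction l with
  | nil => simp at ha
  | cons c l ih =>
      rcases List.mem_cons.1 ha with rfl | ha'
      · rcases List.mem_cons.1 hb with rfl | hb'
        · exact absurd rfl hne
        · exact Or.inl (List.mem_append_left _ (List.mem_map_of_mem hb'))
      · rcases List.mem_cons.1 hb with rfl | hb'
        · exact Or.inr (List.mem_append_left _ (List.mem_map_of_mem ha'))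
        · rcases ih ha' hb' with h | h
          · exact Or.inl (List.mem_append_right _ h)
          · exact Or.inr (List.mem_append_right _ h)

lemma mem_combos_ne {α : Type} (l : List α) (hl : l.Nodup) (p : α × α) (h : p ∈ combos l) :
    p.1 ≠ p.2 := by
  induction l with
  | nil => simp [combos] at h
  | cons a l ih =>
      simp only [combos, List.mem_append, List.mem_map] at h
      rcases h with ⟨b, hb, rfl⟩ | h
      · intro he
        cases he
        exact (List.nodup_cons.1 hl).1 hb
      · exact ih (List.nodup_cons.1 hl).2 h

lemma parse_eq_fold (data : List String) :
    gD data =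
      (altAnts data).foldl (fun d p => d.modify p.1 [] (fun v => v ++ [p.2])) PySem.Dict.empty := by
  unfold gD parseData altAnts
  dsimp only
  rw [List.foldl_flatMap]
  congr 1
  funext d yl
  rw [List.foldl_map, ← PySem.List.foldl_if_eq_foldl_filter]

lemma parse_getD (data : List String) (c : Char) :
    (gD data).getD c [] =
      ((altAnts data).filter (fun t => t.1 == c)).map (fun t => t.2) := by
  rw [parse_eq_fold, PySem.Dict.getD_foldl_modify_append]
  simp

lemma parse_keys_nodup (data : List String) : (gD data).keys.Nodup := by
  rw [parse_eq_fold]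
  exact PySem.Dict.nodup_keys_foldl_modify_key (altAnts data) (fun p => p.1) []
    (fun d p => fun v => v ++ [p.2]) PySem.Dict.empty PySem.Dict.nodup_keys_empty

lemma parse_keys_mem (data : List String) (c : Char) :
    c ∈ (gD data).keys ↔ c ∈ (altAnts data).map (fun t => t.1) := by
  rw [parse_eq_fold,
    PySem.Dict.keys_foldl_modify_key (altAnts data) (fun p => p.1) []
      (fun d p => fun v => v ++ [p.2]) PySem.Dict.empty]
  simp [PySem.Set.mem_update, PySem.Dict.keys_empty]

lemma nodup_altAnts_pos (data : List String) :
    ((altAnts data).map (fun t => t.2)).Nodup := by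
  unfold altAnts
  rw [List.map_flatMap, List.nodup_flatMap]
  constructor
  · intro yl _
    rw [List.map_map]
    have hpw : ((PySem.List.enumerate yl.2.toList 0).filter (fun xc => xc.2 != '.')).Pairwise
        (fun p q => p.1 < q.1) :=
      List.Pairwise.sublist List.filter_sublist (PySem.List.pairwise_lt_enumerate _ _)
    have hne : (((PySem.List.enumerate yl.2.toList 0).filter (fun xc => xc.2 != '.')).map
        ((fun t : Char × Int × Int => t.2) ∘ fun xc => (xc.2, xc.1, yl.1))).Pairwise (· ≠ ·) := by
      rw [List.pairwise_map]
      refine hpw.imp ?_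
      intro p q h
      simp only [Function.comp, ne_eq, Prod.mk.injEq, not_and]
      intro he _
      omega
    exact hne
  · have hpw := PySem.List.pairwise_lt_enumerate data 0
    refine hpw.imp ?_
    intro p q h z hz1 hz2
    simp only [List.map_map, List.mem_map, Function.comp] at hz1 hz2
    rcases hz1 with ⟨a, _, rfl⟩
    rcases hz2 with ⟨b, _, hb⟩
    have : p.1 = q.1 := by
      have := congrArg Prod.snd hb
      simpa using this.symm
    omega

lemma mem_pairStep (data : List String) (s : PySem.Set (Int × Int))
    (pr : (Int × Int) × (Int × Int)) (x : Int × Int) :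
    x ∈ pairStep (gMX data) (gMY data) (gF data) s pr ↔
      x ∈ s ∨ (RunP data pr.1 pr.2 x ∨ RunP data pr.2 pr.1 x) := by
  unfold pairStep
  rw [show -(pr.1.1 - pr.2.1) = pr.2.1 - pr.1.1 from by ring,
    show -(pr.1.2 - pr.2.2) = pr.2.2 - pr.1.2 from by ring,
    show pr.2.1 - (pr.1.1 - pr.2.1) = pr.2.1 + (pr.2.1 - pr.1.1) from by ring,
    show pr.2.2 - (pr.1.2 - pr.2.2) = pr.2.2 + (pr.2.2 - pr.1.2) from by ring]
  rw [mem_walkLoop, mem_walkLoop]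
  simp only [RunP]
  tauto

lemma mem_Aset (data : List String) (x : Int × Int) :
    x ∈ Aset data ↔
      ((∃ c ∈ (gD data).keys, ∃ pr ∈ combos ((gD data).getD c []),
          RunP data pr.1 pr.2 x ∨ RunP data pr.2 pr.1 x) ∨
        (∃ v ∈ (gD data).values.filter (fun v => decide (1 < v.length)), x ∈ v)) := by
  unfold Aset
  rw [mem_foldl_of_step _ (fun v x => x ∈ v)
    (fun s v x => by
      rw [PySem.Set.mem_update, PySem.Set.mem_ofList])]
  rw [mem_foldl_of_step _
    (fun c x => ∃ pr ∈ combos ((gD data).getD c []),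
      RunP data pr.1 pr.2 x ∨ RunP data pr.2 pr.1 x)
    (fun s c x => mem_foldl_of_step _
      (fun pr x => RunP data pr.1 pr.2 x ∨ RunP data pr.2 pr.1 x)
      (fun s pr x => mem_pairStep data s pr x) _ s x)]
  simp only [PySem.Set.empty, List.not_mem_nil, false_or]

lemma mem_bStep (data : List String) (a : Char × Int × Int) (s : PySem.Set (Int × Int))
    (b : Char × Int × Int) (x : Int × Int) :
    x ∈ bStep (gMX data) (gMY data) (gF data) a s b ↔
      x ∈ s ∨ ((a.1 = b.1 ∧ a.2 ≠ b.2) ∧ (x = a.2 ∨ RunP data a.2 b.2 x)) := by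
  unfold bStep
  split_ifs with hg
  · rw [mem_walkLoop]
    have hg' : a.1 = b.1 ∧ a.2 ≠ b.2 := by simpa using hg
    simp only [PySem.Set.mem_add, RunP, hg', true_and]
    tauto
  · have hg' : ¬(a.1 = b.1 ∧ a.2 ≠ b.2) := by simpa using hg
    simp [hg']

lemma mem_Bset (data : List String) (x : Int × Int) :
    x ∈ Bset data ↔
      ∃ a ∈ altAnts data, ∃ b ∈ altAnts data,
        (a.1 = b.1 ∧ a.2 ≠ b.2) ∧ (x = a.2 ∨ RunP data a.2 b.2 x) := by
  unfold Bset
  rw [mem_foldl_of_step _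
    (fun a x => ∃ b ∈ altAnts data, (a.1 = b.1 ∧ a.2 ≠ b.2) ∧ (x = a.2 ∨ RunP data a.2 b.2 x))
    (fun s a x => mem_foldl_of_step _
      (fun b x => (a.1 = b.1 ∧ a.2 ≠ b.2) ∧ (x = a.2 ∨ RunP data a.2 b.2 x))
      (fun s b x => mem_bStep data a s b x) (altAnts data) s x)]
  simp [PySem.Set.empty]

lemma mem_group (data : List String) (c : Char) (p : Int × Int) :
    p ∈ (gD data).getD c [] ↔ ∃ t ∈ altAnts data, t.1 = c ∧ t.2 = p := by
  rw [parse_getD]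
  simp only [List.mem_map, List.mem_filter, beq_iff_eq]
  tauto

lemma nodup_group (data : List String) (c : Char) : ((gD data).getD c []).Nodup := by
  rw [parse_getD]
  exact (nodup_altAnts_pos data).sublist (List.Sublist.map _ List.filter_sublist)

lemma mem_values_iff (data : List String) (v : List (Int × Int)) :
    v ∈ (gD data).values ↔ ∃ c ∈ (gD data).keys, v = (gD data).getD c [] := by
  rw [PySem.Dict.values_eq_map_keys (gD data) (parse_keys_nodup data) []]
  simp only [List.mem_map]
  constructor
  · rintro ⟨c, hc, rfl⟩; exact ⟨c, hc, rfl⟩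
  · rintro ⟨c, hc, rfl⟩; exact ⟨c, hc, rfl⟩

lemma one_lt_length_of_mem_ne {α : Type} {l : List α} {a b : α}
    (ha : a ∈ l) (hb : b ∈ l) (h : a ≠ b) : 1 < l.length := by
  match l with
  | [] => simp at ha
  | [z] =>
      simp only [List.mem_singleton] at ha hb
      exact absurd (ha.trans hb.symm) h
  | _ :: _ :: _ => simp only [List.length_cons]; omega

lemma exists_other {α : Type} (l : List α) (hl : l.Nodup) (hlen : 1 < l.length) (x : α)
    (hx : x ∈ l) : ∃ y ∈ l, y ≠ x := by
  match l, hl, hlen with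
  | u :: w :: t, hl, _ =>
      by_cases hux : u = x
      · refine ⟨w, by simp, ?_⟩
        subst hux
        intro h
        subst h
        exact (List.nodup_cons.1 hl).1 (by simp)
      · exact ⟨u, by simp, hux⟩

lemma mem_Aset_iff_mem_Bset (data : List String) (x : Int × Int) :
    x ∈ Aset data ↔ x ∈ Bset data := by
  rw [mem_Aset, mem_Bset]
  constructor
  · rintro (⟨c, hc, pr, hpr, hrun⟩ | ⟨v, hv, hxv⟩)
    · have hsub := mem_combos_sub _ _ hpr
      obtain ⟨ta, hta, htac, htap⟩ := (mem_group data c pr.1).1 hsub.1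
      obtain ⟨tb, htb, htbc, htbp⟩ := (mem_group data c pr.2).1 hsub.2
      have hne : pr.1 ≠ pr.2 := mem_combos_ne _ (nodup_group data c) _ hpr
      rcases hrun with h | h
      · exact ⟨ta, hta, tb, htb,
          ⟨htac.trans htbc.symm, by rw [htap, htbp]; exact hne⟩,
          Or.inr (by rw [htap, htbp]; exact h)⟩
      · exact ⟨tb, htb, ta, hta,
          ⟨htbc.trans htac.symm, by rw [htap, htbp]; exact hne.symm⟩,
          Or.inr (by rw [htap, htbp]; exact h)⟩
    · obtain ⟨hv', hvlen⟩ := List.mem_filter.1 hv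
      obtain ⟨c, hc, rfl⟩ := (mem_values_iff data _).1 hv'
      have hlen : 1 < ((gD data).getD c []).length := by simpa using hvlen
      obtain ⟨ta, hta, htac, htap⟩ := (mem_group data c x).1 hxv
      obtain ⟨y, hy, hyx⟩ := exists_other _ (nodup_group data c) hlen x hxv
      obtain ⟨tb, htb, htbc, htbp⟩ := (mem_group data c y).1 hy
      exact ⟨ta, hta, tb, htb,
        ⟨htac.trans htbc.symm, by rw [htap, htbp]; exact fun he => hyx he.symm⟩,
        Or.inl htap.symm⟩
  · rintro ⟨a, ha, b, hb, ⟨hcab, hpab⟩, hrun⟩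
    have hck : a.1 ∈ (gD data).keys :=
      (parse_keys_mem data a.1).2 (List.mem_map.2 ⟨a, ha, rfl⟩)
    have hpa : a.2 ∈ (gD data).getD a.1 [] := (mem_group data a.1 a.2).2 ⟨a, ha, rfl, rfl⟩
    have hpb : b.2 ∈ (gD data).getD a.1 [] := (mem_group data a.1 b.2).2 ⟨b, hb, hcab.symm, rfl⟩
    rcases hrun with rfl | hr
    · refine Or.inr ⟨(gD data).getD a.1 [], List.mem_filter.2 ⟨?_, ?_⟩, hpa⟩
      · exact (mem_values_iff data _).2 ⟨a.1, hck, rfl⟩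
      · simpa using one_lt_length_of_mem_ne hpa hpb hpab
    · rcases mem_combos_total _ _ _ hpa hpb hpab with h | h
      · exact Or.inl ⟨a.1, hck, (a.2, b.2), h, Or.inl hr⟩
      · exact Or.inl ⟨a.1, hck, (b.2, a.2), h, Or.inr hr⟩

lemma nodup_Aset (data : List String) : (Aset data).Nodup := by
  unfold Aset
  refine nodup_foldl_of_step _ (fun s v hs => PySem.Set.nodup_update s _ hs) _ _ ?_
  refine nodup_foldl_of_step _ ?_ _ _ List.nodup_nil
  intro s c hs
  refine nodup_foldl_of_step _ ?_ _ _ hs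
  intro s pr hs'
  exact nodup_walkLoop _ _ _ _ _ _ _ (nodup_walkLoop _ _ _ _ _ _ _ hs')

lemma nodup_Bset (data : List String) : (Bset data).Nodup := by
  unfold Bset
  refine nodup_foldl_of_step _ ?_ _ _ List.nodup_nil
  intro s a hs
  refine nodup_foldl_of_step _ ?_ _ _ hs
  intro s b hs'
  unfold bStep
  split_ifs with hg
  · exact nodup_walkLoop _ _ _ _ _ _ _ (PySem.Set.nodup_add _ _ hs')
  · exact hs'

-- ===== VERDICT (by name: the statement is the Claim_ definition above) =====
theorem part2_spec : Claim_equal_part2 := by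
  intro data _ _
  show part2 data = part2_alt data
  rw [part2_eq_len, part2_alt_eq_len]
  have hperm : (Aset data).Perm (Bset data) :=
    (List.perm_ext_iff_of_nodup (nodup_Aset data) (nodup_Bset data)).2
      (mem_Aset_iff_mem_Bset data)
  simp [PySem.Set.len, hperm.length_eq]
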